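-- pv_equiv track=rewrite | github.com/noahprowse/Matrix_ANPR_AND_MIDBLOCK_COUNTER | src/intersection/intersection_export.py | _compute_total_tmc
-- ===== SOURCE A (Python) =====
-- def _compute_total_tmc(
--     tmc_data: dict,
-- ) -> dict[str, dict[str, dict[str, int]]]:
--     """Sum TMC data across all intervals.
--
--     Returns:
--         approach -> movement -> class_code -> count
--     """
--     totals: dict[str, dict[str, dict[str, int]]] = {}
--
--     for interval_tmc in tmc_data.values():
--         for approach, movements in interval_tmc.items():
--             if approach not in totals:
--                 totals[approach] = {}
--             for movement, classes in movements.items():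
--                 if movement not in totals[approach]:
--                     totals[approach][movement] = {}
--                 for cls, count in classes.items():
--                     totals[approach][movement][cls] = (
--                         totals[approach][movement].get(cls, 0) + count
--                     )
--
--     return totals
-- ===== SOURCE B (Python) =====
-- def _compute_total_tmc(
--     tmc_data: dict,
-- ) -> dict[str, dict[str, dict[str, int]]]:
--     """Sum TMC data across all intervals via one recursive merge of the nested dicts."""
--     def merge(dst: dict, src: dict) -> None:
--         for key, value in src.items():
--             if isinstance(value, dict):
--                 merge(dst.setdefault(key, {}), value)
--             else:
--                 dst[key] = dst.get(key, 0) + value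
--
--     totals: dict[str, dict[str, dict[str, int]]] = {}
--     for interval_tmc in tmc_data.values():
--         merge(totals, interval_tmc)
--     return totals
-- ===== Notes on version B (the rewrite author's own statement) =====
-- stated objective: simpler
-- what changed: Replaces A's three explicit nested loops with per-level membership checks on totals by a single recursive merge(dst, src) helper folded over the intervals, which traverses the nested dict structure once per interval.
import Mathlib
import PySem

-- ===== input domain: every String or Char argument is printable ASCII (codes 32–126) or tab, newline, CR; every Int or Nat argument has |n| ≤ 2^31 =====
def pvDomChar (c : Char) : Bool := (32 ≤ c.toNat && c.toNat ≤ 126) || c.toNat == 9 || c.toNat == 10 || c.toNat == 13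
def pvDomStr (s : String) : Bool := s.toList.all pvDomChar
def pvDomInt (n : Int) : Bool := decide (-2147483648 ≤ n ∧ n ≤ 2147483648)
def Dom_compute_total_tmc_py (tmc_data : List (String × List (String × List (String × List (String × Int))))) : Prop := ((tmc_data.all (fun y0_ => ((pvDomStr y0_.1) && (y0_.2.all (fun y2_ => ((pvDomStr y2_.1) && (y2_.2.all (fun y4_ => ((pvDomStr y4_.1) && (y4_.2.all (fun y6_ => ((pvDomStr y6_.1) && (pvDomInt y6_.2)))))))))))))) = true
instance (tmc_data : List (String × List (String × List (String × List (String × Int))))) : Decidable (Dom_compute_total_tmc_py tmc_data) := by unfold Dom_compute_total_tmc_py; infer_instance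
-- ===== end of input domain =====

-- B replaces A's three explicit nested loops by a fold of one per-interval recursive dict merge (alternative decomposition, same cost); equivalence of the RETURN value is proved.

-- shared marshalling: the nested Python dicts arrive as association lists; wrap each level as a PySem.Dict and unwrap the result
def pvToD1 (xs : List (String × Int)) : PySem.Dict String Int := PySem.Dict.ofList xs
def pvToD2 (xs : List (String × List (String × Int))) : PySem.Dict String (PySem.Dict String Int) :=
  PySem.Dict.ofList (xs.map (fun p => (p.1, pvToD1 p.2)))
def pvToD3 (xs : List (String × List (String × List (String × Int)))) :
    PySem.Dict String (PySem.Dict String (PySem.Dict String Int)) :=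
  PySem.Dict.ofList (xs.map (fun p => (p.1, pvToD2 p.2)))
def pvToD4 (xs : List (String × List (String × List (String × List (String × Int))))) :
    PySem.Dict String (PySem.Dict String (PySem.Dict String (PySem.Dict String Int))) :=
  PySem.Dict.ofList (xs.map (fun p => (p.1, pvToD3 p.2)))
def pvFromD2 (d : PySem.Dict String (PySem.Dict String Int)) : List (String × List (String × Int)) :=
  d.items.map (fun p => (p.1, p.2.items))
def pvFromD3 (d : PySem.Dict String (PySem.Dict String (PySem.Dict String Int))) :
    List (String × List (String × List (String × Int))) :=
  d.items.map (fun p => (p.1, pvFromD2 p.2))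

-- ===== PORT A =====
-- literal transliteration of A's four nested loops threading `totals`.
-- `totals[approach]` / `totals[approach][movement]` are read with getD: the preceding
-- membership guards make the key present, so Python's KeyError path is unreachable and getD is exact.
def compute_total_tmc_py (tmc_data : List (String × List (String × List (String × List (String × Int))))) : List (String × List (String × List (String × Int))) :=
  pvFromD3 (((pvToD4 tmc_data).values).foldl (fun totals interval_tmc =>
    interval_tmc.items.foldl (fun totals ap =>
      let totals := if totals.contains ap.1 then totals else totals.insert ap.1 PySem.Dict.empty
      ap.2.items.foldl (fun totals mv =>
        let totals := if (totals.getD ap.1 PySem.Dict.empty).contains mv.1 then totals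
          else totals.modify ap.1 PySem.Dict.empty (fun a => a.insert mv.1 PySem.Dict.empty)
        mv.2.items.foldl (fun totals cv =>
          totals.modify ap.1 PySem.Dict.empty (fun a =>
            a.modify mv.1 PySem.Dict.empty (fun m => m.insert cv.1 (m.getD cv.1 0 + cv.2)))) totals)
        totals)
      totals)
    PySem.Dict.empty)

-- ===== PORT B =====
-- Source B's recursive `merge(dst, src)` specialised to the three (statically typed) nesting levels;
-- Python's in-place `merge(dst.setdefault(k, {}), v)` is `setdefault` followed by `modify` at k.
def pvMergeCls (dst src : PySem.Dict String Int) : PySem.Dict String Int :=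
  src.items.foldl (fun d p => d.insert p.1 (d.getD p.1 0 + p.2)) dst
def pvMergeMov (dst src : PySem.Dict String (PySem.Dict String Int)) : PySem.Dict String (PySem.Dict String Int) :=
  src.items.foldl (fun d p => (d.setdefault p.1 PySem.Dict.empty).modify p.1 PySem.Dict.empty (fun m => pvMergeCls m p.2)) dst
def pvMergeApp (dst src : PySem.Dict String (PySem.Dict String (PySem.Dict String Int))) : PySem.Dict String (PySem.Dict String (PySem.Dict String Int)) :=
  src.items.foldl (fun d p => (d.setdefault p.1 PySem.Dict.empty).modify p.1 PySem.Dict.empty (fun a => pvMergeMov a p.2)) dst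

def compute_total_tmc_py_alt (tmc_data : List (String × List (String × List (String × List (String × Int))))) : List (String × List (String × List (String × Int))) :=
  pvFromD3 (((pvToD4 tmc_data).values).foldl (fun totals interval_tmc => pvMergeApp totals interval_tmc) PySem.Dict.empty)

-- ===== PRECONDITION & SPEC =====
def Spec_compute_total_tmc_py (tmc_data : List (String × List (String × List (String × List (String × Int))))) (out : List (String × List (String × List (String × Int)))) : Prop := out = compute_total_tmc_py_alt tmc_data
instance (tmc_data : List (String × List (String × List (String × List (String × Int))))) (out : List (String × List (String × List (String × Int)))) : Decidable (Spec_compute_total_tmc_py tmc_data out) := by unfold Spec_compute_total_tmc_py; infer_instance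

-- ===== CLAIM (what is proved, stated in full; the proofs are below) =====
def Claim_equal_compute_total_tmc_py : Prop := ∀ (tmc_data : List (String × List (String × List (String × List (String × Int))))), Dom_compute_total_tmc_py tmc_data → Spec_compute_total_tmc_py tmc_data (compute_total_tmc_py tmc_data)

-- ===== LEMMAS AND PROOFS =====

-- named forms of the loop bodies of the two ports (definitionally equal to the inline lambdas)
def pvLeaf (m : PySem.Dict String Int) (cv : String × Int) : PySem.Dict String Int :=
  m.insert cv.1 (m.getD cv.1 0 + cv.2)
def pvACls (k1 k2 : String) (t : PySem.Dict String (PySem.Dict String (PySem.Dict String Int))) (cv : String × Int) :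
    PySem.Dict String (PySem.Dict String (PySem.Dict String Int)) :=
  t.modify k1 PySem.Dict.empty (fun a => a.modify k2 PySem.Dict.empty (fun m => pvLeaf m cv))
def pvAMov (k1 : String) (t : PySem.Dict String (PySem.Dict String (PySem.Dict String Int))) (mv : String × PySem.Dict String Int) :
    PySem.Dict String (PySem.Dict String (PySem.Dict String Int)) :=
  let t := if (t.getD k1 PySem.Dict.empty).contains mv.1 then t
    else t.modify k1 PySem.Dict.empty (fun a => a.insert mv.1 PySem.Dict.empty)
  mv.2.items.foldl (pvACls k1 mv.1) t
def pvAApp (t : PySem.Dict String (PySem.Dict String (PySem.Dict String Int))) (ap : String × PySem.Dict String (PySem.Dict String Int)) :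
    PySem.Dict String (PySem.Dict String (PySem.Dict String Int)) :=
  let t := if t.contains ap.1 then t else t.insert ap.1 PySem.Dict.empty
  ap.2.items.foldl (pvAMov ap.1) t
def pvBMov (a : PySem.Dict String (PySem.Dict String Int)) (mv : String × PySem.Dict String Int) :
    PySem.Dict String (PySem.Dict String Int) :=
  (a.setdefault mv.1 PySem.Dict.empty).modify mv.1 PySem.Dict.empty (fun m => pvMergeCls m mv.2)
def pvBApp (t : PySem.Dict String (PySem.Dict String (PySem.Dict String Int))) (ap : String × PySem.Dict String (PySem.Dict String Int)) :
    PySem.Dict String (PySem.Dict String (PySem.Dict String Int)) :=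
  (t.setdefault ap.1 PySem.Dict.empty).modify ap.1 PySem.Dict.empty (fun a => pvMergeMov a ap.2)

-- invariant of A's accumulator: top-level keys and every approach-level key list are duplicate-free
def pvND (t : PySem.Dict String (PySem.Dict String (PySem.Dict String Int))) : Prop :=
  t.keys.Nodup ∧ ∀ p ∈ t.items, p.2.keys.Nodup

theorem pv_modify_modify {ν : Type} (d : PySem.Dict String ν) (k : String) (d0 : ν) (f g : ν → ν) :
    (d.modify k d0 g).modify k d0 f = d.modify k d0 (fun x => f (g x)) := by
  simp [PySem.Dict.modify, PySem.Dict.getD_insert_self, PySem.Dict.insert_insert_self]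

theorem pv_modify_congr {ν : Type} (d : PySem.Dict String ν) (k : String) (d0 : ν) (f g : ν → ν)
    (h : f (d.getD k d0) = g (d.getD k d0)) : d.modify k d0 f = d.modify k d0 g := by
  simp [PySem.Dict.modify, h]

theorem pv_insert_getD_of_contains {ν : Type} (d : PySem.Dict String ν) (k : String) (d0 : ν)
    (h : d.contains k = true) (hnd : d.keys.Nodup) : d.insert k (d.getD k d0) = d := by
  apply PySem.Dict.ext
  rw [PySem.Dict.items_insert_of_contains _ _ h]
  conv_rhs => rw [← List.map_id d.items]
  apply List.map_congr_left
  intro p hp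
  obtain ⟨pa, pb⟩ := p
  by_cases hk : pa = k
  · have hmem : (k, pb) ∈ d.items := by rw [← hk]; exact hp
    have hg : d.getD k d0 = pb := PySem.Dict.getD_of_mem_items _ hmem hnd d0
    simp [hk, hg]
  · simp [hk]

theorem pv_modify_id {ν : Type} (d : PySem.Dict String ν) (k : String) (d0 : ν)
    (h : d.contains k = true) (hnd : d.keys.Nodup) : d.modify k d0 (fun x => x) = d :=
  pv_insert_getD_of_contains d k d0 h hnd

theorem pv_getD_nodup (t : PySem.Dict String (PySem.Dict String (PySem.Dict String Int))) (k : String)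
    (hnd : pvND t) : (t.getD k PySem.Dict.empty).keys.Nodup := by
  rcases h' : t.get? k with _ | v
  · rw [PySem.Dict.getD_eq_get?_getD, h']
    simp [PySem.Dict.empty, PySem.Dict.keys]
  · rw [PySem.Dict.getD_eq_get?_getD, h']
    exact hnd.2 _ (PySem.Dict.mem_items_of_get?_eq_some _ h')

theorem pv_nodup_setdefault {ν : Type} (d : PySem.Dict String ν) (k : String) (v : ν)
    (h : d.keys.Nodup) : (d.setdefault k v).keys.Nodup := by
  by_cases hc : d.contains k = true
  · rw [PySem.Dict.setdefault_of_contains _ _ hc]; exact h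
  · rw [PySem.Dict.setdefault_of_not_contains _ _ (by simpa using hc)]
    exact PySem.Dict.nodup_keys_insert _ _ _ h

theorem pv_nodup_BMov (a : PySem.Dict String (PySem.Dict String Int)) (mv : String × PySem.Dict String Int)
    (h : a.keys.Nodup) : (pvBMov a mv).keys.Nodup := by
  unfold pvBMov PySem.Dict.modify
  exact PySem.Dict.nodup_keys_insert _ _ _ (pv_nodup_setdefault _ _ _ h)

theorem pv_nodup_foldl_BMov (l : List (String × PySem.Dict String Int))
    (a : PySem.Dict String (PySem.Dict String Int)) (h : a.keys.Nodup) :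
    (l.foldl pvBMov a).keys.Nodup := by
  induction l generalizing a with
  | nil => exact h
  | cons mv rest ih => exact ih _ (pv_nodup_BMov a mv h)

theorem pvND_insert (t : PySem.Dict String (PySem.Dict String (PySem.Dict String Int))) (k : String)
    (v : PySem.Dict String (PySem.Dict String Int)) (h : pvND t) (hv : v.keys.Nodup) :
    pvND (t.insert k v) := by
  refine ⟨PySem.Dict.nodup_keys_insert _ _ _ h.1, ?_⟩
  intro p hp
  rcases (PySem.Dict.mem_items_insert _ _ _ _).1 hp with h1 | ⟨h1, _⟩
  · subst h1; exact hv
  · exact h.2 _ h1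

theorem pvND_empty : pvND PySem.Dict.empty := by
  constructor
  · simp [PySem.Dict.empty, PySem.Dict.keys]
  · intro p hp; simp [PySem.Dict.empty] at hp

theorem pv_cls_collapse (k1 k2 : String) (cvs : List (String × Int)) :
    ∀ (t : PySem.Dict String (PySem.Dict String (PySem.Dict String Int)))
      (f : PySem.Dict String Int → PySem.Dict String Int),
    cvs.foldl (pvACls k1 k2) (t.modify k1 PySem.Dict.empty (fun a => a.modify k2 PySem.Dict.empty f)) =
      t.modify k1 PySem.Dict.empty (fun a => a.modify k2 PySem.Dict.empty (fun m => cvs.foldl pvLeaf (f m))) := by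
  induction cvs with
  | nil => intro t f; simp [List.foldl_nil]
  | cons cv rest ih =>
    intro t f
    rw [List.foldl_cons]
    have h1 : pvACls k1 k2 (t.modify k1 PySem.Dict.empty (fun a => a.modify k2 PySem.Dict.empty f)) cv
        = t.modify k1 PySem.Dict.empty (fun a => a.modify k2 PySem.Dict.empty (fun m => pvLeaf (f m) cv)) := by
      unfold pvACls
      rw [pv_modify_modify]
      apply pv_modify_congr
      rw [pv_modify_modify]
    rw [h1, ih]
    simp [List.foldl_cons]

theorem pv_mov_step (k1 : String) (t : PySem.Dict String (PySem.Dict String (PySem.Dict String Int)))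
    (mv : String × PySem.Dict String Int) (hc : t.contains k1 = true) (hnd : pvND t) :
    pvAMov k1 t mv = t.modify k1 PySem.Dict.empty (fun a => pvBMov a mv) := by
  have ha : (t.getD k1 PySem.Dict.empty).keys.Nodup := pv_getD_nodup t k1 hnd
  unfold pvAMov pvBMov
  by_cases h2 : (t.getD k1 PySem.Dict.empty).contains mv.1 = true
  · rw [if_pos h2]
    have hbase : t = t.modify k1 PySem.Dict.empty
        (fun a => a.modify mv.1 PySem.Dict.empty (fun m => m)) := by
      show t = t.insert k1 ((t.getD k1 PySem.Dict.empty).modify mv.1 PySem.Dict.empty (fun m => m))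
      rw [pv_modify_id _ _ _ h2 ha, pv_insert_getD_of_contains _ _ _ hc hnd.1]
    conv_lhs => rw [hbase, pv_cls_collapse]
    apply pv_modify_congr
    rw [PySem.Dict.setdefault_of_contains _ _ h2]
    rfl
  · rw [if_neg h2]
    have h2' : (t.getD k1 PySem.Dict.empty).contains mv.1 = false := by simpa using h2
    have hins : (fun (a : PySem.Dict String (PySem.Dict String Int)) => a.insert mv.1 PySem.Dict.empty)
        = (fun a => a.modify mv.1 PySem.Dict.empty (fun _ => PySem.Dict.empty)) := rfl
    rw [hins, pv_cls_collapse]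
    apply pv_modify_congr
    rw [PySem.Dict.setdefault_of_not_contains _ _ h2']
    simp [PySem.Dict.modify, PySem.Dict.getD_insert_self, PySem.Dict.insert_insert_self, pvMergeCls]
    rfl

theorem pv_mov_fold (k1 : String) (mvs : List (String × PySem.Dict String Int)) :
    ∀ (t : PySem.Dict String (PySem.Dict String (PySem.Dict String Int))),
    t.contains k1 = true → pvND t →
    mvs.foldl (pvAMov k1) t = t.modify k1 PySem.Dict.empty (fun a => mvs.foldl pvBMov a) := by
  induction mvs with
  | nil =>
    intro t hc hnd
    simp only [List.foldl_nil]
    exact (pv_modify_id t k1 _ hc hnd.1).symm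
  | cons mv rest ih =>
    intro t hc hnd
    rw [List.foldl_cons, pv_mov_step k1 t mv hc hnd]
    have hc' : (t.modify k1 PySem.Dict.empty (fun a => pvBMov a mv)).contains k1 = true := by
      rw [PySem.Dict.contains_modify]; simp
    have hnd' : pvND (t.modify k1 PySem.Dict.empty (fun a => pvBMov a mv)) := by
      unfold PySem.Dict.modify
      exact pvND_insert _ _ _ hnd (pv_nodup_BMov _ _ (pv_getD_nodup t k1 hnd))
    rw [ih _ hc' hnd', pv_modify_modify]
    simp [List.foldl_cons]

theorem pv_app_step (t : PySem.Dict String (PySem.Dict String (PySem.Dict String Int)))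
    (ap : String × PySem.Dict String (PySem.Dict String Int)) (hnd : pvND t) :
    pvAApp t ap = pvBApp t ap := by
  unfold pvAApp pvBApp
  by_cases hc : t.contains ap.1 = true
  · rw [if_pos hc, pv_mov_fold _ _ _ hc hnd, PySem.Dict.setdefault_of_contains _ _ hc]
    rfl
  · rw [if_neg hc]
    have hc' : t.contains ap.1 = false := by simpa using hc
    have hc1 : (t.insert ap.1 PySem.Dict.empty).contains ap.1 = true :=
      PySem.Dict.contains_insert_self _ _ _
    have hnd1 : pvND (t.insert ap.1 PySem.Dict.empty) :=
      pvND_insert _ _ _ hnd (by simp [PySem.Dict.empty, PySem.Dict.keys])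
    rw [pv_mov_fold _ _ _ hc1 hnd1, PySem.Dict.setdefault_of_not_contains _ _ hc']
    simp [PySem.Dict.modify, PySem.Dict.getD_insert_self, PySem.Dict.insert_insert_self, pvMergeMov]
    rfl

theorem pvND_BApp (t : PySem.Dict String (PySem.Dict String (PySem.Dict String Int)))
    (ap : String × PySem.Dict String (PySem.Dict String Int)) (hnd : pvND t) :
    pvND (pvBApp t ap) := by
  have hsd : pvND (t.setdefault ap.1 PySem.Dict.empty) := by
    by_cases hc : t.contains ap.1 = true
    · rw [PySem.Dict.setdefault_of_contains _ _ hc]; exact hnd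
    · rw [PySem.Dict.setdefault_of_not_contains _ _ (by simpa using hc)]
      exact pvND_insert _ _ _ hnd (by simp [PySem.Dict.empty, PySem.Dict.keys])
  unfold pvBApp PySem.Dict.modify
  refine pvND_insert _ _ _ hsd ?_
  exact pv_nodup_foldl_BMov _ _ (pv_getD_nodup _ _ hsd)

theorem pv_app_fold (aps : List (String × PySem.Dict String (PySem.Dict String Int))) :
    ∀ (t : PySem.Dict String (PySem.Dict String (PySem.Dict String Int))), pvND t →
    aps.foldl pvAApp t = aps.foldl pvBApp t ∧ pvND (aps.foldl pvBApp t) := by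
  induction aps with
  | nil => intro t hnd; exact ⟨rfl, hnd⟩
  | cons ap rest ih =>
    intro t hnd
    rw [List.foldl_cons, List.foldl_cons, pv_app_step t ap hnd]
    exact ih _ (pvND_BApp t ap hnd)

theorem pv_top_fold (ivs : List (PySem.Dict String (PySem.Dict String (PySem.Dict String Int)))) :
    ∀ (t : PySem.Dict String (PySem.Dict String (PySem.Dict String Int))), pvND t →
    ivs.foldl (fun t iv => iv.items.foldl pvAApp t) t
      = ivs.foldl (fun t iv => iv.items.foldl pvBApp t) t := by
  induction ivs with
  | nil => intro t _; rfl
  | cons iv rest ih =>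
    intro t hnd
    rw [List.foldl_cons, List.foldl_cons, (pv_app_fold iv.items t hnd).1]
    exact ih _ (pv_app_fold iv.items t hnd).2

-- ===== VERDICT (by name: the statement is the Claim_ definition above) =====
theorem compute_total_tmc_py_spec : Claim_equal_compute_total_tmc_py := by
  intro tmc_data _
  unfold Spec_compute_total_tmc_py compute_total_tmc_py compute_total_tmc_py_alt
  have h := pv_top_fold ((pvToD4 tmc_data).values) PySem.Dict.empty pvND_empty
  exact congrArg pvFromD3 h
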